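-- pv_equiv track=rewrite | github.com/leelooai999-dot/aetherlan-war | tools/animation-pipeline/python/detect_sheet_layout.py | transparent_gaps
-- ===== SOURCE A (Python) =====
-- def transparent_gaps(mask, min_run=2):
--     gaps = []
--     start = None
--     for i, filled in enumerate(mask):
--         if not filled and start is None:
--             start = i
--         elif filled and start is not None:
--             if i - start >= min_run:
--                 gaps.append((start, i - 1))
--             start = None
--     if start is not None and len(mask) - start >= min_run:
--         gaps.append((start, len(mask) - 1))
--     return gaps
-- ===== SOURCE B (Python) =====
-- def transparent_gaps(mask, min_run=2):
--     # Gaps are the intervals strictly between consecutive filled positions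
--     # (with virtual filled sentinels at -1 and len(mask)).
--     bounds = [-1] + [i for i, f in enumerate(mask) if f] + [len(mask)]
--     return [(p + 1, q - 1) for p, q in zip(bounds, bounds[1:])
--             if q - p > 1 and q - p - 1 >= min_run]
-- ===== Notes on version B (the rewrite author's own statement) =====
-- stated objective: alternative
-- what changed: Instead of a single-pass start/None state machine over the mask, B first collects the indices of filled cells (with virtual sentinels -1 and len(mask)) and then emits, for each consecutive pair of filled bounds, the nonempty interval strictly between them when it is long enough.
import Mathlib
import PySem

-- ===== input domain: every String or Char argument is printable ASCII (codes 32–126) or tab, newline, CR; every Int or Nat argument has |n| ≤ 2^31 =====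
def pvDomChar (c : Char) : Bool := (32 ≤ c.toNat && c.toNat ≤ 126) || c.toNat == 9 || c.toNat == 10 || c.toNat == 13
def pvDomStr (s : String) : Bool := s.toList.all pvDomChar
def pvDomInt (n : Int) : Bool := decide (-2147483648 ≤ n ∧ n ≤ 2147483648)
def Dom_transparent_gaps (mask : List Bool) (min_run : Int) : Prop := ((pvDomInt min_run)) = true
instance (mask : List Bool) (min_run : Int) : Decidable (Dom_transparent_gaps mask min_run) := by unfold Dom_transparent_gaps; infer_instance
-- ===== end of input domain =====

-- B replaces A's start/None state machine with a boundary-pair construction: collect the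
-- filled indices (with sentinels -1 and len) and emit long-enough intervals between
-- consecutive bounds (alternative decomposition, same cost).


-- ===== PORT A =====
-- literal transliteration of A: foldl over enumerate(mask) with state (gaps, start : Option Int),
-- then the trailing-run fixup after the loop.
def tgStepA (min_run : Int) (st : List (Int × Int) × Option Int) (p : Int × Bool) :
    List (Int × Int) × Option Int :=
  match st, p with
  | (gaps, start), (i, filled) =>
    if !filled && start.isNone then (gaps, some i)
    else if filled && start.isSome then
      match start with
      | some s => (if i - s ≥ min_run then gaps ++ [(s, i - 1)] else gaps, none)
      | none => (gaps, start)   -- unreachable (start.isSome)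
    else (gaps, start)

def transparent_gaps (mask : List Bool) (min_run : Int) : List (Int × Int) :=
  match (PySem.List.enumerate mask).foldl (tgStepA min_run) ([], none) with
  | (gaps, some s) =>
      if (mask.length : Int) - s ≥ min_run then gaps ++ [(s, (mask.length : Int) - 1)] else gaps
  | (gaps, none) => gaps

-- ===== PORT B =====
-- literal transliteration of B: bounds = [-1] + filled indices + [len(mask)];
-- then the comprehension over zip(bounds, bounds[1:]).
def transparent_gaps_alt (mask : List Bool) (min_run : Int) : List (Int × Int) :=
  let bounds : List Int :=
    -1 :: ((PySem.List.enumerate mask).filterMap (fun p => if p.2 then some p.1 else none)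
            ++ [(mask.length : Int)])
  (bounds.zip bounds.tail).filterMap
    (fun pq => if pq.2 - pq.1 > 1 ∧ pq.2 - pq.1 - 1 ≥ min_run
               then some (pq.1 + 1, pq.2 - 1) else none)

-- ===== PRECONDITION & SPEC =====
def Spec_transparent_gaps (mask : List Bool) (min_run : Int) (out : List (Int × Int)) : Prop := out = transparent_gaps_alt mask min_run
instance (mask : List Bool) (min_run : Int) (out : List (Int × Int)) : Decidable (Spec_transparent_gaps mask min_run out) := by unfold Spec_transparent_gaps; infer_instance

-- ===== CLAIM (what is proved, stated in full; the proofs are below) =====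
def Claim_equal_transparent_gaps : Prop := ∀ (mask : List Bool) (min_run : Int), Dom_transparent_gaps mask min_run → Spec_transparent_gaps mask min_run (transparent_gaps mask min_run)

-- ===== LEMMAS AND PROOFS =====

-- a recursive reformulation of A's foldl over enumerate
def tgLoopA (min_run : Int) : List Bool → Int → List (Int × Int) × Option Int →
    List (Int × Int) × Option Int
  | [], _, st => st
  | f :: rest, i, st => tgLoopA min_run rest (i + 1) (tgStepA min_run st (i, f))

lemma foldl_enumerate_eq_loopA (min_run : Int) (mask : List Bool) (i : Int)
    (st : List (Int × Int) × Option Int) :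
    (PySem.List.enumerate mask i).foldl (tgStepA min_run) st = tgLoopA min_run mask i st := by
  induction mask generalizing i st with
  | nil => simp [tgLoopA, PySem.List.enumerate_nil]
  | cons f rest ih => simp [tgLoopA, PySem.List.enumerate_cons, List.foldl_cons, ih]

-- A's trailing-run fixup, as a function of the loop's final state
def tgFinish (min_run L : Int) : List (Int × Int) × Option Int → List (Int × Int)
  | (gaps, some s) => if L - s ≥ min_run then gaps ++ [(s, L - 1)] else gaps
  | (gaps, none) => gaps

-- the filled indices of the suffix, offset i (= B's bounds without the sentinels)
def tgBounds : List Bool → Int → List Int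
  | [], _ => []
  | x :: xs, i => (if x then [i] else []) ++ tgBounds xs (i + 1)

-- emission over consecutive bounds, with pending left bound p and right sentinel n
def tgPairs (min_run : Int) (p : Int) : List Int → Int → List (Int × Int)
  | [], n => if n - p > 1 ∧ n - p - 1 ≥ min_run then [(p + 1, n - 1)] else []
  | q :: qs, n =>
      (if q - p > 1 ∧ q - p - 1 ≥ min_run then [(p + 1, q - 1)] else []) ++
        tgPairs min_run q qs n

lemma filterMap_enumerate_eq_bounds (mask : List Bool) (i : Int) :
    (PySem.List.enumerate mask i).filterMap (fun p => if p.2 then some p.1 else none) =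
      tgBounds mask i := by
  induction mask generalizing i with
  | nil => simp [tgBounds, PySem.List.enumerate_nil]
  | cons x xs ih =>
      cases x <;> simp [tgBounds, PySem.List.enumerate_cons, List.filterMap_cons, ih]

-- the zipped comprehension over p :: l ++ [n] is tgPairs p l n
lemma zip_filterMap_eq_pairs (min_run : Int) (l : List Int) (p n : Int) :
    (((p :: (l ++ [n])).zip (l ++ [n])).filterMap
      (fun pq => if pq.2 - pq.1 > 1 ∧ pq.2 - pq.1 - 1 ≥ min_run
                 then some (pq.1 + 1, pq.2 - 1) else none)) = tgPairs min_run p l n := by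
  induction l generalizing p with
  | nil => simp [tgPairs, List.filterMap_cons]; split_ifs <;> simp
  | cons q qs ih =>
      simp only [List.cons_append, List.zip_cons_cons, List.filterMap_cons, tgPairs, ih]
      split_ifs <;> simp

-- joint invariant: A's loop + fixup from either state equals B's pair emission,
-- with the pending left bound being the last filled index (i-1 for state none,
-- s-1 for state some s with the pending run s..i-1 unfilled).
lemma tg_invariant (min_run : Int) :
    ∀ (mask : List Bool) (i : Int) (gaps : List (Int × Int)),
    (tgFinish min_run (i + mask.length) (tgLoopA min_run mask i (gaps, none)) =
        gaps ++ tgPairs min_run (i - 1) (tgBounds mask i) (i + mask.length)) ∧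
    (∀ s : Int, s ≤ i - 1 →
      tgFinish min_run (i + mask.length) (tgLoopA min_run mask i (gaps, some s)) =
        gaps ++ tgPairs min_run (s - 1) (tgBounds mask i) (i + mask.length)) := by
  intro mask
  induction mask with
  | nil =>
      intro i gaps
      constructor
      · simp [tgLoopA, tgFinish, tgBounds, tgPairs]
      · intro s hs
        simp only [tgLoopA, tgFinish, tgBounds, tgPairs, List.length_nil, Int.natCast_zero,
          add_zero]
        by_cases hc : i - s ≥ min_run
        · rw [if_pos hc, if_pos ⟨by omega, by omega⟩]
          simp [show s - 1 + 1 = s by ring]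
        · rw [if_neg hc, if_neg (by omega)]
          simp
  | cons y ys ih =>
      intro i gaps
      have hlen : i + ((y :: ys).length : Int) = (i + 1) + (ys.length : Int) := by
        push_cast [List.length_cons]; ring
      constructor
      · cases y with
        | true =>
            have hstep : tgLoopA min_run (true :: ys) i (gaps, none) =
                tgLoopA min_run ys (i + 1) (gaps, none) := by
              simp [tgLoopA, tgStepA]
            rw [hlen, hstep, show tgBounds (true :: ys) i = i :: tgBounds ys (i + 1) by
              simp [tgBounds]]
            have := (ih (i + 1) gaps).1
            rw [this, tgPairs]
            rw [if_neg (by omega)]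
            simp [show i + 1 - 1 = i by ring]
        | false =>
            have hstep : tgLoopA min_run (false :: ys) i (gaps, none) =
                tgLoopA min_run ys (i + 1) (gaps, some i) := by
              simp [tgLoopA, tgStepA]
            rw [hlen, hstep, show tgBounds (false :: ys) i = tgBounds ys (i + 1) by
              simp [tgBounds]]
            exact (ih (i + 1) gaps).2 i (by omega)
      · intro s hs
        cases y with
        | false =>
            have hstep : tgLoopA min_run (false :: ys) i (gaps, some s) =
                tgLoopA min_run ys (i + 1) (gaps, some s) := by
              simp [tgLoopA, tgStepA]
            rw [hlen, hstep, show tgBounds (false :: ys) i = tgBounds ys (i + 1) by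
              simp [tgBounds]]
            exact (ih (i + 1) gaps).2 s (by omega)
        | true =>
            have hstep : tgLoopA min_run (true :: ys) i (gaps, some s) =
                tgLoopA min_run ys (i + 1)
                  (if i - s ≥ min_run then gaps ++ [(s, i - 1)] else gaps, none) := by
              simp [tgLoopA, tgStepA]
            rw [hlen, hstep, show tgBounds (true :: ys) i = i :: tgBounds ys (i + 1) by
              simp [tgBounds]]
            have := (ih (i + 1)
              (if i - s ≥ min_run then gaps ++ [(s, i - 1)] else gaps)).1
            rw [this, tgPairs]
            simp only [show i + 1 - 1 = i by ring]
            by_cases hc : i - s ≥ min_run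
            · rw [if_pos hc, if_pos ⟨by omega, by omega⟩]
              simp [show s - 1 + 1 = s by ring, List.append_assoc]
            · rw [if_neg hc, if_neg (by omega)]
              simp

-- ===== VERDICT (by name: the statement is the Claim_ definition above) =====
theorem transparent_gaps_spec : Claim_equal_transparent_gaps := by
  intro mask min_run _
  unfold Spec_transparent_gaps transparent_gaps transparent_gaps_alt
  rw [show (PySem.List.enumerate mask : List (Int × Bool)) = PySem.List.enumerate mask 0 from rfl,
    foldl_enumerate_eq_loopA]
  have hfin : ∀ st : List (Int × Int) × Option Int,
      (match st with
        | (gaps, some s) =>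
            if (mask.length : Int) - s ≥ min_run then gaps ++ [(s, (mask.length : Int) - 1)]
            else gaps
        | (gaps, none) => gaps) = tgFinish min_run (mask.length : Int) st := by
    rintro ⟨gaps, _ | s⟩ <;> simp [tgFinish]
  rw [hfin]
  have hA := (tg_invariant min_run mask 0 []).1
  simp only [zero_add, List.nil_append] at hA
  rw [hA]
  simp only [filterMap_enumerate_eq_bounds]
  exact (zip_filterMap_eq_pairs min_run (tgBounds mask 0) (-1) (mask.length : Int)).symm
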